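-- pv_equiv track=rewrite | github.com/SoyDeSoya23/CSCI_3320_PA2 | Quezada-PA2.py | getFinalSorted
-- ===== SOURCE A (Python) =====
-- def getFinalSorted(original, excluding, sorted_temp):
--     """
--     FUNCTION getFinalSorted:
--     Creates an array containing all the user inputted integers;
--     all integers that needed to be sorted were sorted and all integers
--     whose position needed to be preserved is maintained.
--
--     INPUT PARAMETERS:
--     :param original: The original unmodified array from the user.
--     :param excluding: An array created from calling the preservedIndices function; contains indices.
--     :param sorted_temp: An array containing the sorted elements within the user-specified range.
--
--     OUTPUT:
--     :return: The final sorted array.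
--     """
--     p = 0  # counter to increment the index of the sorted_temp arra
--     for i in range(len(original)):
--         if i in excluding:  # preserves the positions for those elements out of the specified range
--             pass
--         else:
--             original[i] = sorted_temp[p]
--             p += 1
--     return original
-- ===== SOURCE B (Python) =====
-- def getFinalSorted(original, excluding, sorted_temp):
--     # Opposite construction direction: start from the needed prefix of the
--     # sorted values and INSERT each preserved element back at its index
--     # (ascending), instead of walking original and overwriting with a counter.
--     # Mutates `original` in place (original[:] = ...) and returns it, like A.
--     excluded = [i for i in range(len(original)) if i in excluding]
--     out = list(sorted_temp[:len(original) - len(excluded)])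
--     for i in excluded:
--         out.insert(i, original[i])
--     original[:] = out
--     return original
-- ===== Notes on version B (the rewrite author's own statement) =====
-- stated objective: alternative
-- what changed: B constructs the result in the opposite direction: it takes the needed prefix of sorted_temp and inserts each preserved original element back at its excluded index (ascending), instead of A's walk over original that overwrites non-excluded slots with a running counter into sorted_temp.
import Mathlib
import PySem

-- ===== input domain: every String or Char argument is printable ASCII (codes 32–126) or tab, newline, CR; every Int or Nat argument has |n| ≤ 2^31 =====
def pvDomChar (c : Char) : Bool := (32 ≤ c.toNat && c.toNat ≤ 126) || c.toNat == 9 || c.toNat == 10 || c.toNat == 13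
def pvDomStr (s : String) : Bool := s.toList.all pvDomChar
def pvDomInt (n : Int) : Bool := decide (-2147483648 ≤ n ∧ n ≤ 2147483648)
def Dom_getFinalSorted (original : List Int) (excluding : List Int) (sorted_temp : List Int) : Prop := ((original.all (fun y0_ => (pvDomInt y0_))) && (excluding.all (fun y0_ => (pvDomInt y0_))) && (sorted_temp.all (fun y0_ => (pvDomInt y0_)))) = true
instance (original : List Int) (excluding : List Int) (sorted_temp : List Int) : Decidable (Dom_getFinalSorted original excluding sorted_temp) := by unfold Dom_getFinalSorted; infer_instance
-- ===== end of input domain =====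

-- B builds the result in the opposite direction: it takes the needed prefix of sorted_temp and
-- inserts each preserved element back at its index, instead of overwriting original with a counter.
-- Both Pythons mutate `original` in place identically (B via original[:] = ...); the theorems are about the returned value.

-- ===== PORT A =====
-- Port of A: loop over range(len(original)) carrying (array, p); sorted_temp[p] is in range
-- whenever Pre_ holds (Python raises IndexError exactly outside Pre_), so getD _ 0 is exact there.
def getFinalSorted (original : List Int) (excluding : List Int) (sorted_temp : List Int) : List Int :=
  ((List.range original.length).foldl
    (fun (st : List Int × Nat) (i : Nat) =>
      if (↑i : Int) ∈ excluding then st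
      else (st.1.set i (sorted_temp.getD st.2 0), st.2 + 1))
    (original, 0)).1

-- ===== PORT B =====
-- Port of B: excluded-indices comprehension, prefix of sorted_temp (slice [:k] with k ≥ 0 = take),
-- then a loop inserting original[i] (i < len(original), so getD i 0 is exact) at position i.
def getFinalSorted_alt (original : List Int) (excluding : List Int) (sorted_temp : List Int) : List Int :=
  let excluded := (List.range original.length).filter (fun (i : Nat) => decide ((↑i : Int) ∈ excluding))
  let out := sorted_temp.take (original.length - excluded.length)
  excluded.foldl (fun (acc : List Int) (i : Nat) => PySem.List.insert acc (↑i : Int) (original.getD i 0)) out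

-- ===== PRECONDITION & SPEC =====
-- Pre_ excludes exactly the inputs on which A raises IndexError (more non-excluded positions
-- than elements of sorted_temp).
def Pre_getFinalSorted (original : List Int) (excluding : List Int) (sorted_temp : List Int) : Prop :=
  ((List.range original.length).filter (fun (i : Nat) => !decide ((↑i : Int) ∈ excluding))).length ≤ sorted_temp.length
instance (original : List Int) (excluding : List Int) (sorted_temp : List Int) : Decidable (Pre_getFinalSorted original excluding sorted_temp) := by unfold Pre_getFinalSorted; infer_instance
def pvWitness_getFinalSorted : List Int × List Int × List Int := ([3, 1, 2], [0], [1, 2])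
def Spec_getFinalSorted (original : List Int) (excluding : List Int) (sorted_temp : List Int) (out : List Int) : Prop := out = getFinalSorted_alt original excluding sorted_temp
instance (original : List Int) (excluding : List Int) (sorted_temp : List Int) (out : List Int) : Decidable (Spec_getFinalSorted original excluding sorted_temp out) := by unfold Spec_getFinalSorted; infer_instance

-- ===== CLAIM =====
def Claim_equal_getFinalSorted : Prop := ∀ (original : List Int) (excluding : List Int) (sorted_temp : List Int), Dom_getFinalSorted original excluding sorted_temp → Pre_getFinalSorted original excluding sorted_temp → Spec_getFinalSorted original excluding sorted_temp (getFinalSorted original excluding sorted_temp)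

-- ===== LEMMAS AND PROOFS =====

-- A's loop body and B's loop body, named for the proofs (definitionally those of the ports).
def stepA (excluding sorted_temp : List Int) (st : List Int × Nat) (i : Nat) : List Int × Nat :=
  if (↑i : Int) ∈ excluding then st else (st.1.set i (sorted_temp.getD st.2 0), st.2 + 1)

def stepB (original : List Int) (acc : List Int) (i : Nat) : List Int :=
  PySem.List.insert acc (↑i : Int) (original.getD i 0)

theorem portA_eq (original excluding sorted_temp : List Int) :
    getFinalSorted original excluding sorted_temp
      = ((List.range original.length).foldl (stepA excluding sorted_temp) (original, 0)).1 := rfl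

theorem portB_eq (original excluding sorted_temp : List Int) :
    getFinalSorted_alt original excluding sorted_temp
      = (((List.range original.length).filter (fun (i : Nat) => decide ((↑i : Int) ∈ excluding))).foldl
          (stepB original)
          (sorted_temp.take (original.length -
            ((List.range original.length).filter (fun (i : Nat) => decide ((↑i : Int) ∈ excluding))).length))) := rfl

-- A's fold preserves the length of the array.
theorem foldA_length (excluding sorted_temp : List Int) :
    ∀ (L : List Nat) (o : List Int) (p : Nat),
      ((L.foldl (stepA excluding sorted_temp) (o, p)).1).length = o.length := by
  intro L
  induction L with
  | nil => intro o p; simp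
  | cons i L ih =>
    intro o p
    by_cases h : (↑i : Int) ∈ excluding
    · simpa [stepA, h] using ih o p
    · simpa [stepA, h] using ih (o.set i (sorted_temp.getD p 0)) (p + 1)

-- A's counter after the fold is the starting counter plus the number of non-excluded indices.
theorem foldA_snd (excluding sorted_temp : List Int) :
    ∀ (L : List Nat) (o : List Int) (p : Nat),
      (L.foldl (stepA excluding sorted_temp) (o, p)).2
        = p + (L.filter (fun (i : Nat) => !decide ((↑i : Int) ∈ excluding))).length := by
  intro L
  induction L with
  | nil => intro o p; simp
  | cons i L ih =>
    intro o p
    by_cases h : (↑i : Int) ∈ excluding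
    · simpa [stepA, h] using ih o p
    · simp only [stepA, h, List.foldl_cons, List.filter_cons, decide_false, Bool.not_false,
        if_false, if_true]
      rw [ih (o.set i (sorted_temp.getD p 0)) (p + 1)]
      simp
      omega

-- A's fold only touches indices in L, so a last element rides along untouched.
theorem foldA_append_last (excluding sorted_temp : List Int) :
    ∀ (L : List Nat) (o : List Int) (a : Int) (p : Nat), (∀ i ∈ L, i < o.length) →
      L.foldl (stepA excluding sorted_temp) (o ++ [a], p)
        = ((L.foldl (stepA excluding sorted_temp) (o, p)).1 ++ [a],
           (L.foldl (stepA excluding sorted_temp) (o, p)).2) := by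
  intro L
  induction L with
  | nil => intro o a p _; simp
  | cons i L ih =>
    intro o a p hlt
    have hi : i < o.length := hlt i (by simp)
    by_cases h : (↑i : Int) ∈ excluding
    · simpa [stepA, h] using ih o a p (fun j hj => hlt j (by simp [hj]))
    · have hset : (o ++ [a]).set i (sorted_temp.getD p 0) = o.set i (sorted_temp.getD p 0) ++ [a] :=
        List.set_append_left _ _ hi
      simp only [stepA, h, List.foldl_cons, if_false, hset]
      exact ih (o.set i (sorted_temp.getD p 0)) a (p + 1)
        (fun j hj => by simpa using hlt j (by simp [hj]))

-- Inserting at a valid position commutes with a trailing element.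
theorem insert_append_last (l : List Int) (y x : Int) (i : Nat) (h : i ≤ l.length) :
    PySem.List.insert (l ++ [y]) (↑i : Int) x = PySem.List.insert l (↑i : Int) x ++ [y] := by
  rw [PySem.List.insert_natCast _ _ _ h,
      PySem.List.insert_natCast _ _ _ (by simp; omega)]
  rw [List.take_append_of_le_length h, List.drop_append_of_le_length h]
  simp

theorem insert_valid_length (l : List Int) (x : Int) (i : Nat) (h : i ≤ l.length) :
    (PySem.List.insert l (↑i : Int) x).length = l.length + 1 := by
  rw [PySem.List.insert_natCast _ _ _ h]
  simp

-- B's insert-fold commutes with a trailing element, provided every insert lands inside the list.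
theorem foldB_append_last (original : List Int) :
    ∀ (E : List Nat) (l : List Int) (y : Int),
      (∀ (j : Nat) (hj : j < E.length), E[j] ≤ l.length + j) →
      E.foldl (stepB original) (l ++ [y]) = E.foldl (stepB original) l ++ [y] := by
  intro E
  induction E with
  | nil => intro l y _; simp
  | cons i E ih =>
    intro l y hv
    have h0 : i ≤ l.length := by simpa using hv 0 (by simp)
    simp only [List.foldl_cons, stepB]
    rw [insert_append_last _ _ _ _ h0]
    exact ih _ y (fun j hj => by
      have h1 := hv (j + 1) (by simpa using Nat.succ_lt_succ hj)
      rw [List.getElem_cons_succ] at h1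
      have h2 := insert_valid_length l (original.getD i 0) i h0
      omega)

-- Validity of B's inserts: the j-th excluded index of range n is at most (n - #excluded) + j.
theorem excluded_valid (excluding : List Int) :
    ∀ (n : Nat) (j : Nat),
      j < ((List.range n).filter (fun (i : Nat) => decide ((↑i : Int) ∈ excluding))).length →
      ((List.range n).filter (fun (i : Nat) => decide ((↑i : Int) ∈ excluding))).getD j 0
        ≤ (n - ((List.range n).filter (fun (i : Nat) => decide ((↑i : Int) ∈ excluding))).length) + j := by
  intro n
  induction n with
  | zero => intro j hj; simp at hj
  | succ n ih =>
    intro j hj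
    have hle : ((List.range n).filter (fun (i : Nat) => decide ((↑i : Int) ∈ excluding))).length ≤ n :=
      le_trans (List.length_filter_le _ _) (by simp)
    rw [List.range_succ, List.filter_append] at hj ⊢
    by_cases h : (↑n : Int) ∈ excluding
    · simp only [List.filter_cons, List.filter_nil, h, decide_true, if_true] at hj ⊢
      rcases Nat.lt_or_ge j ((List.range n).filter (fun (i : Nat) => decide ((↑i : Int) ∈ excluding))).length with hlt | hge
      · rw [List.getD_append _ _ _ _ hlt]
        have := ih j hlt
        simp only [List.length_append, List.length_cons, List.length_nil]
        omega
      · have hjeq : j = ((List.range n).filter (fun (i : Nat) => decide ((↑i : Int) ∈ excluding))).length := by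
          simp only [List.length_append, List.length_cons, List.length_nil] at hj
          omega
        subst hjeq
        rw [List.getD_append_right _ _ _ _ (Nat.le_refl _)]
        simp only [Nat.sub_self, List.length_append, List.length_cons, List.length_nil,
          List.getD_cons_zero]
        omega
    · simp only [List.filter_cons, List.filter_nil, h, decide_false, Bool.false_eq_true,
        if_false, List.append_nil] at hj ⊢
      have := ih j hj
      omega

-- The excluded and the non-excluded indices of range n partition it.
theorem filter_partition (excluding : List Int) (n : Nat) :
    ((List.range n).filter (fun (i : Nat) => decide ((↑i : Int) ∈ excluding))).length
      + ((List.range n).filter (fun (i : Nat) => !decide ((↑i : Int) ∈ excluding))).length = n := by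
  induction n with
  | zero => simp
  | succ n ih =>
    rw [List.range_succ]
    by_cases h : (↑n : Int) ∈ excluding <;> simp [List.filter_append, h] <;> omega

-- Setting the position just past l in l ++ [a] replaces the trailing element.
theorem set_last (l : List Int) (a x : Int) : (l ++ [a]).set l.length x = l ++ [x] := by
  induction l with
  | nil => rfl
  | cons b l ih => simpa using ih

-- Main equivalence, by reverse induction on `original`.
theorem main_equiv (excluding sorted_temp : List Int) :
    ∀ (original : List Int),
      Pre_getFinalSorted original excluding sorted_temp →
      getFinalSorted original excluding sorted_temp = getFinalSorted_alt original excluding sorted_temp := by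
  intro original
  induction original using List.reverseRecOn with
  | nil => intro _; rfl
  | append_singleton o a ih =>
    intro hpre
    have hE := filter_partition excluding o.length
    have hE1 := filter_partition excluding (o.length + 1)
    have hlenE : ((List.range o.length).filter (fun (i : Nat) => decide ((↑i : Int) ∈ excluding))).length ≤ o.length :=
      le_trans (List.length_filter_le _ _) (by simp)
    rw [portA_eq, portB_eq]
    simp only [List.length_append, List.length_cons, List.length_nil, Nat.zero_add]
    rw [List.range_succ, List.foldl_append, List.filter_append]
    rw [foldA_append_last excluding sorted_temp _ o a 0 (fun i hi => by simpa using List.mem_range.mp hi)]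
    have hsnd := foldA_snd excluding sorted_temp (List.range o.length) o 0
    have hfstlen := foldA_length excluding sorted_temp (List.range o.length) o 0
    -- names for the two halves
    set E := (List.range o.length).filter (fun (i : Nat) => decide ((↑i : Int) ∈ excluding)) with hEdef
    set K := ((List.range o.length).filter (fun (i : Nat) => !decide ((↑i : Int) ∈ excluding))).length with hKdef
    set A0 := ((List.range o.length).foldl (stepA excluding sorted_temp) (o, 0)).1 with hA0
    -- Pre_ for the prefix o
    have hpre' : Pre_getFinalSorted o excluding sorted_temp := by
      unfold Pre_getFinalSorted at hpre ⊢
      rw [List.length_append, List.length_cons, List.length_nil, List.range_succ,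
        List.filter_append] at hpre
      simp only [List.length_append] at hpre
      omega
    have ihv : A0 = E.foldl (stepB o) (sorted_temp.take (o.length - E.length)) := by
      have := ih hpre'
      rw [portA_eq, portB_eq] at this
      exact this
    have hk : o.length - E.length = K := by omega
    by_cases h : (↑o.length : Int) ∈ excluding
    · -- last index preserved: A leaves it, B appends it by the final insert
      simp only [List.foldl_cons, List.foldl_nil, List.filter_cons, List.filter_nil, h,
        decide_true, if_true, stepA]
      rw [List.foldl_append]
      simp only [List.foldl_cons, List.foldl_nil, List.length_append, List.length_cons,
        List.length_nil]
      have hlen1 : o.length + 1 - (E.length + 1) = o.length - E.length := by omega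
      rw [hlen1]
      -- reads of original at indices < o.length are reads of o
      have hcong : E.foldl (stepB (o ++ [a])) (sorted_temp.take (o.length - E.length))
          = E.foldl (stepB o) (sorted_temp.take (o.length - E.length)) := by
        apply PySem.List.foldl_congr_mem
        intro acc i hi
        have hio : i < o.length := List.mem_range.mp (List.mem_of_mem_filter hi)
        have hg : (o ++ [a])[i]? = o[i]? := List.getElem?_append_left hio
        simp [stepB, List.getD, hg]
      rw [hcong, ← ihv]
      -- final insert at position o.length = A0.length appends a
      have : (o ++ [a]).getD o.length 0 = a := by
        simp [List.getD]
      simp only [stepB]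
      rw [this]
      have hA0len : (A0 : List Int).length = o.length := hfstlen
      rw [PySem.List.insert_natCast _ _ _ (by omega)]
      simp [List.take_of_length_le (le_of_eq hA0len), List.drop_of_length_le (le_of_eq hA0len)]
    · -- last index sorted: A writes sorted_temp[K], B's prefix grows by that element
      simp only [List.foldl_cons, List.foldl_nil, List.filter_cons, List.filter_nil, h,
        decide_false, Bool.false_eq_true, if_false, List.append_nil, stepA]
      have hlen1 : o.length + 1 - E.length = (o.length - E.length) + 1 := by omega
      rw [hlen1, hk]
      have hKlt : K < sorted_temp.length := by
        unfold Pre_getFinalSorted at hpre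
        rw [List.length_append, List.length_cons, List.length_nil, List.range_succ,
          List.filter_append] at hpre
        simp only [List.filter_cons, List.filter_nil, h, decide_false, Bool.not_false,
          if_true, List.length_append, List.length_cons, List.length_nil] at hpre
        omega
      -- take (K+1) = take K ++ [sorted_temp[K]]
      have htake : sorted_temp.take (K + 1) = sorted_temp.take K ++ [sorted_temp.getD K 0] := by
        rw [List.getD_eq_getElem _ _ hKlt]
        exact List.take_succ_eq_append_getElem hKlt
      rw [htake]
      have hcong : ∀ (init : List Int), E.foldl (stepB (o ++ [a])) init = E.foldl (stepB o) init := by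
        intro init
        apply PySem.List.foldl_congr_mem
        intro acc i hi
        have hio : i < o.length := List.mem_range.mp (List.mem_of_mem_filter hi)
        have hg : (o ++ [a])[i]? = o[i]? := List.getElem?_append_left hio
        simp [stepB, List.getD, hg]
      rw [hcong]
      have hvalid : ∀ (j : Nat) (hj : j < E.length), E[j] ≤ (sorted_temp.take K).length + j := by
        intro j hj
        have h1 := excluded_valid excluding o.length j hj
        rw [List.getD_eq_getElem _ _ hj] at h1
        rw [← hEdef] at h1
        rw [List.length_take, Nat.min_eq_left (le_of_lt hKlt)]
        omega
      rw [foldB_append_last o E (sorted_temp.take K) (sorted_temp.getD K 0) hvalid]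
      -- A side: set at position o.length of A0 ++ [a]
      rw [hsnd, Nat.zero_add, ← hk, ← ihv]
      have hA0len : (A0 : List Int).length = o.length := hfstlen
      rw [← hA0len, set_last]

-- ===== VERDICT =====
theorem getFinalSorted_spec : Claim_equal_getFinalSorted := by
  intro original excluding sorted_temp _ hpre
  unfold Spec_getFinalSorted
  exact main_equiv excluding sorted_temp original hpre
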